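-- pv_equiv track=rewrite | github.com/TheRealBastioul/Duplicate-Checker | CharacterDuplicates.py | missing_letters
-- ===== SOURCE A (Python) =====
-- alphabet = "abcdefghijklmnopqrstuvwxyz"
--
-- def histogram(s):
--     d = dict()
--     for c in s:
--         if c not in d:
--             d[c] = 1
--         else:
--             d[c] += 1
--     return d
--
-- def missing_letters(runit):
--     alphadict = histogram(alphabet)
--     missing = ()
--     for i in runit:
--         for key, value in alphadict.items():
--             if key == i:
--                 alphadict[i] += 1
--     for key, value in alphadict.items():
--         if value > 1:
--             pass
--         else:
--             missing += key,
--     return ', '.join(missing)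
-- ===== SOURCE B (Python) =====
-- alphabet = "abcdefghijklmnopqrstuvwxyz"
--
-- def missing_letters(runit):
--     seen = set(runit)
--     missing = [c for c in alphabet if c not in seen]
--     return ', '.join(missing)
-- ===== Notes on version B (the rewrite author's own statement) =====
-- stated objective: faster
-- what changed: Replaces A's count histogram, its nested per-input-char scan over all 26 dict items and the count>1 filter with a single seen-set built in one pass and one membership test per alphabet letter.
import Mathlib
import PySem

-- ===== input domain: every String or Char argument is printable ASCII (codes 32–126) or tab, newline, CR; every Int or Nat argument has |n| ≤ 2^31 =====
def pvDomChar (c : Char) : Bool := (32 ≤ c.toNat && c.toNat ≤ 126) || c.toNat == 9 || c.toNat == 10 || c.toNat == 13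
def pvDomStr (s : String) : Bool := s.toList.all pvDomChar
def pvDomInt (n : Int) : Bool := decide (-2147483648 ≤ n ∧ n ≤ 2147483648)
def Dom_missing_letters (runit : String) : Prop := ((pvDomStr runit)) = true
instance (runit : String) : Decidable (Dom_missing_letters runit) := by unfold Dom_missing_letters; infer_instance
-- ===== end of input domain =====

-- B replaces A's count histogram and nested item-scan with one seen-set and a membership pass over the alphabet (simpler; same results).

-- ===== PORT A =====
def pyAlphabet : String := "abcdefghijklmnopqrstuvwxyz"

def histogramA (s : String) : PySem.Dict Char Int :=
  s.toList.foldl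
    (fun d c => if !(d.contains c) then d.insert c 1 else d.modify c 0 (· + 1)) PySem.Dict.empty

def missing_letters (runit : String) : String :=
  let alphadict := histogramA pyAlphabet
  let alphadict := runit.toList.foldl
    (fun d i => d.items.foldl
      (fun acc kv => if kv.1 == i then acc.modify i 0 (· + 1) else acc) d) alphadict
  let missing := alphadict.items.foldl
    (fun m kv => if kv.2 > 1 then m else m ++ [kv.1]) []
  PySem.Str.join ", " (missing.map (fun c => String.ofList [c]))

-- ===== PORT B =====
def missing_letters_alt (runit : String) : String :=
  let seen : PySem.Set Char := PySem.Set.ofList runit.toList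
  let missing := pyAlphabet.toList.filter (fun c => !(PySem.Set.contains seen c))
  PySem.Str.join ", " (missing.map (fun c => String.ofList [c]))

-- ===== PRECONDITION & SPEC =====
def Spec_missing_letters (runit : String) (out : String) : Prop := out = missing_letters_alt runit
instance (runit : String) (out : String) : Decidable (Spec_missing_letters runit out) := by unfold Spec_missing_letters; infer_instance

-- ===== CLAIM (what is proved, stated in full; the proofs are below) =====
def Claim_equal_missing_letters : Prop := ∀ (runit : String), Dom_missing_letters runit → Spec_missing_letters runit (missing_letters runit)

-- ===== LEMMAS AND PROOFS =====

-- the inner per-char scan does nothing when i is not among the scanned keys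
lemma inner_none (L : List (Char × Int)) (d : PySem.Dict Char Int) (i : Char)
    (h : i ∉ L.map Prod.fst) :
    L.foldl (fun acc kv => if kv.1 == i then acc.modify i 0 (· + 1) else acc) d = d := by
  induction L generalizing d with
  | nil => rfl
  | cons kv t ih =>
    simp only [List.map_cons, List.mem_cons, not_or] at h
    rw [List.foldl_cons, if_neg (by simpa using (Ne.symm h.1))]
    exact ih d h.2

-- the inner per-char scan increments the count at i exactly when i is a key
lemma inner_fold (L : List (Char × Int)) (d : PySem.Dict Char Int) (i : Char)
    (hnd : (L.map Prod.fst).Nodup) :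
    L.foldl (fun acc kv => if kv.1 == i then acc.modify i 0 (· + 1) else acc) d
      = if i ∈ L.map Prod.fst then d.modify i 0 (· + 1) else d := by
  induction L generalizing d with
  | nil => simp
  | cons kv t ih =>
    simp only [List.map_cons, List.nodup_cons] at hnd
    by_cases hk : kv.1 = i
    · subst hk
      rw [List.foldl_cons, if_pos (by simp)]
      rw [inner_none _ _ _ hnd.1]
      simp
    · rw [List.foldl_cons, if_neg (by simpa using hk)]
      rw [ih d hnd.2]
      by_cases hm : i ∈ t.map Prod.fst <;> simp [hm, Ne.symm hk]

def alphaChars : List Char := pyAlphabet.toList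

-- the outer loop preserves the key list and adds the occurrence count to each alphabet key
lemma outer_fold (l : List Char) (d : PySem.Dict Char Int) (hk : d.keys = alphaChars) :
    (l.foldl (fun d i => d.items.foldl
        (fun acc kv => if kv.1 == i then acc.modify i 0 (· + 1) else acc) d) d).keys = alphaChars ∧
    ∀ c ∈ alphaChars,
      (l.foldl (fun d i => d.items.foldl
        (fun acc kv => if kv.1 == i then acc.modify i 0 (· + 1) else acc) d) d).getD c 0
        = d.getD c 0 + l.count c := by
  induction l generalizing d with
  | nil => exact ⟨hk, fun c _ => by simp⟩
  | cons i t ih =>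
    have hnd : (d.items.map Prod.fst).Nodup := by
      have : d.keys = d.items.map Prod.fst := rfl
      rw [← this, hk]; decide
    have hstep : d.items.foldl (fun acc kv => if kv.1 == i then acc.modify i 0 (· + 1) else acc) d
        = if i ∈ alphaChars then d.modify i 0 (· + 1) else d := by
      rw [inner_fold _ _ _ hnd]
      have : d.items.map Prod.fst = alphaChars := hk
      rw [this]
    simp only [List.foldl_cons, hstep]
    by_cases hi : i ∈ alphaChars
    · rw [if_pos hi]
      have hcont : d.contains i = true :=
        (PySem.Dict.contains_iff_mem_keys d i).mpr (hk ▸ hi)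
      have hk' : (d.modify i 0 (· + 1)).keys = alphaChars := by
        rw [PySem.Dict.keys_modify, PySem.Dict.keys_insert_of_contains _ _ hcont, hk]
      obtain ⟨h1, h2⟩ := ih _ hk'
      refine ⟨h1, fun c hc => ?_⟩
      rw [h2 c hc, PySem.Dict.getD_modify]
      by_cases hci : c = i
      · subst hci; simp; omega
      · simp [hci, Ne.symm hci]
    · rw [if_neg hi]
      obtain ⟨h1, h2⟩ := ih _ hk
      refine ⟨h1, fun c hc => ?_⟩
      rw [h2 c hc, List.count_cons]
      have : ¬ (i = c) := fun h => hi (h ▸ hc)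
      simp [this]

-- the collection loop is a filter-then-map
lemma missing_fold (L : List (Char × Int)) (acc : List Char) :
    L.foldl (fun m kv => if kv.2 > 1 then m else m ++ [kv.1]) acc
      = acc ++ (L.filter (fun kv => !(decide (kv.2 > 1)))).map Prod.fst := by
  induction L generalizing acc with
  | nil => simp
  | cons kv t ih =>
    by_cases h : kv.2 > 1 <;> simp [List.foldl_cons, h, ih]

-- ===== VERDICT (by name: the statement is the Claim_ definition above) =====
set_option maxRecDepth 4000 in
theorem missing_letters_spec : Claim_equal_missing_letters := by
  intro runit _
  unfold Spec_missing_letters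
  simp only [missing_letters, missing_letters_alt]
  have hitems0 : (histogramA pyAlphabet).items = alphaChars.map (fun c => (c, (1:Int))) := by
    decide
  have hk0 : (histogramA pyAlphabet).keys = alphaChars := by
    show (histogramA pyAlphabet).items.map Prod.fst = alphaChars
    rw [hitems0, List.map_map]; simp [Function.comp_def]
  have hnd0 : (histogramA pyAlphabet).keys.Nodup := by rw [hk0]; decide
  have hg0 : ∀ c ∈ alphaChars, (histogramA pyAlphabet).getD c 0 = 1 := by
    intro c hc
    exact PySem.Dict.getD_of_mem_items _
      (by rw [hitems0]; exact List.mem_map.mpr ⟨c, hc, rfl⟩) hnd0 0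
  obtain ⟨hk, hg⟩ := outer_fold runit.toList (histogramA pyAlphabet) hk0
  set d' := runit.toList.foldl (fun d i => d.items.foldl
      (fun acc kv => if kv.1 == i then acc.modify i 0 (· + 1) else acc) d) (histogramA pyAlphabet)
    with hd'
  have hnd : d'.keys.Nodup := by rw [hk]; decide
  have hitems : d'.items = alphaChars.map (fun c => (c, d'.getD c 0)) := by
    rw [PySem.Dict.items_eq_map_keys d' hnd 0, hk]
  rw [hitems, missing_fold]
  have hfm : (alphaChars.map (fun c => (c, d'.getD c 0))).filter
        (fun kv => !(decide (kv.2 > 1)))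
      = (alphaChars.filter (fun c => !(decide (d'.getD c 0 > 1)))).map
          (fun c => (c, d'.getD c 0)) := by
    rw [List.filter_map]; rfl
  rw [hfm, List.map_map]
  have hfilter : alphaChars.filter (fun c => !(decide (d'.getD c 0 > 1)))
      = alphaChars.filter (fun c => !(PySem.Set.contains (PySem.Set.ofList runit.toList) c)) := by
    apply List.filter_congr
    intro c hc
    have : d'.getD c 0 = 1 + runit.toList.count c := by
      rw [hg c hc, hg0 c hc]
    rw [this]
    have hmem : PySem.Set.contains (PySem.Set.ofList runit.toList) c
        = decide (c ∈ runit.toList) := by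
      simp [PySem.Set.contains, PySem.Set.mem_ofList]
    rw [hmem]
    by_cases h : c ∈ runit.toList
    · have h0 : 0 < runit.toList.count c := List.count_pos_iff.mpr h
      have hgt : (1:Int) + (runit.toList.count c : Int) > 1 := by
        have : (1:Int) ≤ (runit.toList.count c : Int) := by exact_mod_cast h0
        omega
      simp [h, hgt]
    · have h0 : runit.toList.count c = 0 := List.count_eq_zero.mpr h
      have hgt : ¬ ((1:Int) + (runit.toList.count c : Int) > 1) := by rw [h0]; norm_num
      simp [h, hgt]
  rw [hfilter]
  simp [alphaChars, Function.comp_def]
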